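-- pv_equiv track=rewrite | github.com/adgodoyo/Data-Structures-and-Algorithms | 1 Algorithmic Toolbox/3W3_car.py | min_refills
-- ===== SOURCE A (Python) =====
-- def min_refills(distance, tank, stops):
--     # Agregar la posición inicial (0) y la posición final (distance) a las paradas
--     stops = [0] + stops + [distance]
--     num_refills = 0
--     current_position = 0
--     last_refill = 0
--
--     while current_position < len(stops) - 1:
--         last_refill = current_position
--
--         # Avanzar lo más lejos posible dentro del alcance del tanque
--         while (current_position < len(stops) - 1 and
--                stops[current_position + 1] - stops[last_refill] <= tank):
--             current_position += 1
--
--         # Si no se avanzó, no es posible llegar al destino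
--         if current_position == last_refill:
--             return -1
--
--         # Si no estamos en la última parada, incrementamos el número de recargas
--         if current_position < len(stops) - 1:
--             num_refills += 1
--
--     return num_refills
-- ===== SOURCE B (Python) =====
-- def min_refills(distance, tank, stops):
--     points = [0] + stops + [distance]
--     refills = 0
--     last = 0
--     for i in range(1, len(points)):
--         if points[i] - points[last] > tank:
--             if points[i] - points[i - 1] > tank:
--                 return -1
--             refills += 1
--             last = i - 1
--     return refills
-- ===== Notes on version B (the rewrite author's own statement) =====
-- stated objective: simpler
-- what changed: Replaced A's nested while loops (outer per refill, inner advancing as far as possible) by a single for loop over consecutive points that maintains the last-refill index, with no nested scan.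
import Mathlib
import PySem

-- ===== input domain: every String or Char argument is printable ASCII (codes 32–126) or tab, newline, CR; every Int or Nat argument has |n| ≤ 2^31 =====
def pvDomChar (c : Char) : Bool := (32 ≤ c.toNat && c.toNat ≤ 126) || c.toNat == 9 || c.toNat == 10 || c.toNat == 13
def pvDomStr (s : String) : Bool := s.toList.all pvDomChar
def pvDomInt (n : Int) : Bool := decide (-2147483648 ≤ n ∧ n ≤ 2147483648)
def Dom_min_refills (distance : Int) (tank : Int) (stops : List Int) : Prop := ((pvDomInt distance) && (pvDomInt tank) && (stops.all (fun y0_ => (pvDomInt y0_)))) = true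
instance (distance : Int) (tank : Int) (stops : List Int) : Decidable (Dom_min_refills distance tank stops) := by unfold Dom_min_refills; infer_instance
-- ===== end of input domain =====

-- B replaces A's nested while loops by a single left-to-right pass maintaining the
-- last-refill index (objective: simpler decomposition, same O(n) cost; return value identical).

-- ===== PORT A =====
-- A rebinds its local 'stops' to [0] + stops + [distance]; the caller's list is not mutated.
-- Indices reached by the loops are always in range, so list indexing is ported as getD _ 0.

-- inner while loop of A: advance current_position while within reach of last_refill
def aInner (pts : List Int) (tank : Int) (last : Nat) (cur : Nat) (fuel : Nat) : Nat :=
  match fuel with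
  | 0 => cur
  | fuel + 1 =>
    if cur < pts.length - 1 ∧ pts.getD (cur + 1) 0 - pts.getD last 0 ≤ tank then
      aInner pts tank last (cur + 1) fuel
    else cur

-- outer while loop of A (fuel-bounded; fuel ≥ pts.length suffices)
def aOuter (pts : List Int) (tank : Int) (refills : Int) (cur : Nat) (fuel : Nat) : Int :=
  match fuel with
  | 0 => refills
  | fuel + 1 =>
    if cur < pts.length - 1 then
      let c2 := aInner pts tank cur cur pts.length
      if c2 = cur then -1
      else aOuter pts tank (if c2 < pts.length - 1 then refills + 1 else refills) c2 fuel
    else refills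

def min_refills (distance : Int) (tank : Int) (stops : List Int) : Int :=
  let pts := 0 :: stops ++ [distance]
  aOuter pts tank 0 0 pts.length

-- ===== PORT B =====
-- the single for loop of B: i runs from 1 to len(points) - 1
def bLoop (pts : List Int) (tank : Int) (i : Nat) (last : Nat) (refills : Int) : Int :=
  if i < pts.length then
    if pts.getD i 0 - pts.getD last 0 > tank then
      if pts.getD i 0 - pts.getD (i - 1) 0 > tank then -1
      else bLoop pts tank (i + 1) (i - 1) (refills + 1)
    else bLoop pts tank (i + 1) last refills
  else refills
termination_by pts.length - i

def min_refills_alt (distance : Int) (tank : Int) (stops : List Int) : Int :=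
  let pts := 0 :: stops ++ [distance]
  bLoop pts tank 1 0 0

-- ===== PRECONDITION & SPEC =====
def Spec_min_refills (distance : Int) (tank : Int) (stops : List Int) (out : Int) : Prop := out = min_refills_alt distance tank stops
instance (distance : Int) (tank : Int) (stops : List Int) (out : Int) : Decidable (Spec_min_refills distance tank stops out) := by unfold Spec_min_refills; infer_instance

-- ===== CLAIM (what is proved, stated in full; the proofs are below) =====
def Claim_equal_min_refills : Prop := ∀ (distance : Int) (tank : Int) (stops : List Int), Dom_min_refills distance tank stops → Spec_min_refills distance tank stops (min_refills distance tank stops)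

-- ===== LEMMAS AND PROOFS =====

-- ===== VERDICT (by name: the statement is the Claim_ definition above) =====
-- characterisation of the inner while loop
theorem aInner_ge (pts : List Int) (tank : Int) (last cur fuel : Nat) :
    cur ≤ aInner pts tank last cur fuel := by
  induction fuel generalizing cur with
  | zero => simp [aInner]
  | succ f ih =>
    simp only [aInner]
    split
    · exact le_trans (Nat.le_succ cur) (ih (cur + 1))
    · exact le_refl cur

theorem aInner_reach (pts : List Int) (tank : Int) (last cur fuel : Nat) :
    ∀ i, cur < i → i ≤ aInner pts tank last cur fuel →
      i ≤ pts.length - 1 ∧ pts.getD i 0 - pts.getD last 0 ≤ tank := by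
  induction fuel generalizing cur with
  | zero =>
    intro i hi hle
    simp [aInner] at hle
    omega
  | succ f ih =>
    intro i hi hle
    simp only [aInner] at hle
    split at hle
    · rename_i h
      rcases Nat.lt_or_ge (cur + 1) i with h1 | h1
      · exact ih (cur + 1) i h1 hle
      · have : i = cur + 1 := by omega
        subst this
        exact ⟨by omega, h.2⟩
    · omega

theorem aInner_stop (pts : List Int) (tank : Int) (last cur fuel : Nat)
    (hfuel : pts.length - 1 - cur ≤ fuel) :
    ¬ (aInner pts tank last cur fuel < pts.length - 1 ∧
       pts.getD (aInner pts tank last cur fuel + 1) 0 - pts.getD last 0 ≤ tank) := by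
  induction fuel generalizing cur with
  | zero =>
    simp only [aInner]
    omega
  | succ f ih =>
    simp only [aInner]
    split
    · exact ih (cur + 1) (by rename_i h; omega)
    · assumption

-- B's loop skips an index within reach of last without changing state
theorem bLoop_skip (pts : List Int) (tank : Int) (i last : Nat) (r : Int)
    (hi : i < pts.length) (h : pts.getD i 0 - pts.getD last 0 ≤ tank) :
    bLoop pts tank i last r = bLoop pts tank (i + 1) last r := by
  rw [bLoop]
  simp only [hi, if_true]
  rw [if_neg (by omega)]

theorem bLoop_skip_upto (pts : List Int) (tank : Int) (last : Nat) (r : Int) :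
    ∀ a b : Nat, a ≤ b → b ≤ pts.length →
      (∀ i, a ≤ i → i < b → pts.getD i 0 - pts.getD last 0 ≤ tank) →
      bLoop pts tank a last r = bLoop pts tank b last r := by
  intro a b hab
  induction hab with
  | refl => intro _ _; rfl
  | step h ih =>
    rename_i b'
    intro hlen hall
    rw [ih (by omega) (fun i h1 h2 => hall i h1 (by omega))]
    exact bLoop_skip pts tank b' last r (by omega) (hall b' h (by omega))

-- after a refill at index i-1, B's loop from i with the new last equals the old-state loop
theorem bLoop_refill (pts : List Int) (tank : Int) (i last : Nat) (r : Int)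
    (hi : i < pts.length)
    (h : pts.getD i 0 - pts.getD last 0 > tank) :
    bLoop pts tank i last r = bLoop pts tank i (i - 1) (r + 1) := by
  rw [bLoop]
  conv_rhs => rw [bLoop]
  simp only [hi, if_true]
  rw [if_pos h]
  by_cases hc : pts.getD i 0 - pts.getD (i - 1) 0 > tank
  · rw [if_pos hc, if_pos hc, if_pos hc]
  · rw [if_neg hc, if_neg (by omega)]

-- the main simulation: A's outer loop from position cur equals B's loop from index cur+1
theorem outer_sim (pts : List Int) (tank : Int) :
    ∀ fuel cur (r : Int), cur < pts.length → pts.length - cur ≤ fuel →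
      aOuter pts tank r cur fuel = bLoop pts tank (cur + 1) cur r := by
  intro fuel
  induction fuel with
  | zero => intro cur r hcur hf; omega
  | succ f ih =>
    intro cur r hcur hf
    rw [aOuter]
    by_cases hg : cur < pts.length - 1
    · rw [if_pos hg]
      set c2 := aInner pts tank cur cur pts.length with hc2
      have hge := aInner_ge pts tank cur cur pts.length
      have hreach := aInner_reach pts tank cur cur pts.length
      have hstop := aInner_stop pts tank cur cur pts.length (by omega)
      rw [← hc2] at hge hreach hstop
      by_cases heq : c2 = cur
      · -- stuck: consecutive gap from cur unreachable; B returns -1 at i = cur+1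
        rw [if_pos heq]
        rw [heq] at hstop
        have hgap : pts.getD (cur + 1) 0 - pts.getD cur 0 > tank := by
          by_contra hle
          exact hstop ⟨hg, by omega⟩
        rw [bLoop]
        rw [if_pos (by omega), if_pos hgap]
        simp only [Nat.add_sub_cancel]
        rw [if_pos hgap]
      · rw [if_neg heq]
        have hlt : cur < c2 := lt_of_le_of_ne hge (fun h => heq h.symm)
        have hc2le : c2 ≤ pts.length - 1 := (hreach c2 hlt (le_refl c2)).1
        have hskip : bLoop pts tank (cur + 1) cur r = bLoop pts tank (c2 + 1) cur r := by
          apply bLoop_skip_upto pts tank cur r (cur + 1) (c2 + 1) (by omega) (by omega)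
          intro i h1 h2
          exact (hreach i (by omega) (by omega)).2
        rw [hskip]
        by_cases hend : c2 < pts.length - 1
        · -- refill at c2: A increments refills and continues; B refills at index c2+1
          rw [if_pos hend]
          have hfar : pts.getD (c2 + 1) 0 - pts.getD cur 0 > tank := by
            by_contra hle
            exact hstop ⟨hend, by omega⟩
          rw [bLoop_refill pts tank (c2 + 1) cur r (by omega) hfar]
          simp only [Nat.add_sub_cancel]
          exact ih c2 (r + 1) (by omega) (by omega)
        · -- destination reached: both loops finish with refills unchanged
          rw [if_neg hend]
          have hc2 : c2 = pts.length - 1 := by omega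
          rw [ih c2 r (by omega) (by omega)]
          rw [bLoop, if_neg (by omega)]
          rw [bLoop, if_neg (by omega)]
    · rw [if_neg hg]
      rw [bLoop]
      rw [if_neg (by omega)]

theorem min_refills_spec : Claim_equal_min_refills := by
  intro distance tank stops _
  unfold Spec_min_refills min_refills min_refills_alt
  exact outer_sim (0 :: stops ++ [distance]) tank _ 0 0 (by simp) (by omega)
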